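-- pv_equiv track=rewrite | github.com/wogkr810/coding-test | 프로그래머스/lv1/42840. 모의고사/모의고사.py | solution
-- ===== SOURCE A (Python) =====
-- def solution(answers):
--     len_ans = len(answers)
--
--     one = [1,2,3,4,5]
--     two = [2,1,2,3,2,4,2,5]
--     three = [3,3,1,1,2,2,4,4,5,5]
--
--     div_one = divmod(len_ans,len(one))
--     div_two = divmod(len_ans,len(two))
--     div_three = divmod(len_ans,len(three))
--
--     one_list = one * div_one[0] + one[:div_one[1]]
--     two_list = two * div_two[0] + two[:div_two[1]]
--     three_list = three * div_three[0] + three[:div_three[1]]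
--
--     res = {1:0 , 2:0 , 3:0}
--
--     for i in range(len(answers)):
--         if answers[i] == one_list[i]:
--             res[1] += 1
--         if answers[i] == two_list[i]:
--             res[2] += 1
--         if answers[i] == three_list[i]:
--             res[3] += 1
--
--     res = sorted(res.items(), key = lambda x : x[1], reverse=True)
--
--     return [i[0] for i in res if i[1]==res[0][1]]
-- ===== SOURCE B (Python) =====
-- def solution(answers):
--     # One counting pass builds a frequency table keyed by (position mod 40, answer),
--     # 40 = lcm of the three pattern periods; each score is then 40 table lookups,
--     # never rescanning answers.
--     hist = {}
--     for i, a in enumerate(answers):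
--         key = (i % 40, a)
--         hist[key] = hist.get(key, 0) + 1
--
--     patterns = [[1, 2, 3, 4, 5],
--                 [2, 1, 2, 3, 2, 4, 2, 5],
--                 [3, 3, 1, 1, 2, 2, 4, 4, 5, 5]]
--     scores = [sum(hist.get((j, p[j % len(p)]), 0) for j in range(40))
--               for p in patterns]
--     m = max(scores)
--     return [i + 1 for i, s in enumerate(scores) if s == m]
-- ===== Notes on version B (the rewrite author's own statement) =====
-- stated objective: alternative
-- what changed: A precomputes three full-length tiled answer lists, counts all three matches in one fused loop into a dict and sorts the dict items by value to keep ties; B makes one counting pass that builds a frequency table keyed by (index mod 40, answer) -- 40 = lcm of the three pattern periods -- then computes each score as 40 table lookups without rescanning answers, and returns the indices achieving max(scores).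
import Mathlib
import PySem

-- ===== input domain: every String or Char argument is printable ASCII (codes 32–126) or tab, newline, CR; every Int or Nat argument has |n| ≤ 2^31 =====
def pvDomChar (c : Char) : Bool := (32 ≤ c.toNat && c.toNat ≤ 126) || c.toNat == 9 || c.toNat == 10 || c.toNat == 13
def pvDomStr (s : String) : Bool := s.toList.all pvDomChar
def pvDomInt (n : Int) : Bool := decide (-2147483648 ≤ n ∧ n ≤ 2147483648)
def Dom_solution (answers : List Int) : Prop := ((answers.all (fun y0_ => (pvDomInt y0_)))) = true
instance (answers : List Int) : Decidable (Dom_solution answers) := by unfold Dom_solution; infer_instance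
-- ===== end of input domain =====

-- B replaces A's three precomputed full-length pattern lists + fused dict-counting loop + sort-by-value
-- with one counting pass into a frequency table keyed by (index mod 40, answer) (40 = lcm of the periods),
-- scores read off as 40 table lookups each, and a max-filter (objective: alternative).

-- ===== PORT A =====
def solution (answers : List Int) : List Int :=
  let len_ans : Int := PySem.List.len answers
  let one : List Int := [1, 2, 3, 4, 5]
  let two : List Int := [2, 1, 2, 3, 2, 4, 2, 5]
  let three : List Int := [3, 3, 1, 1, 2, 2, 4, 4, 5, 5]
  -- divmod(a, b) with a literal nonzero divisor is (floordiv, mod) (exact)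
  let div_one : Int × Int := (PySem.Int.floordiv len_ans (PySem.List.len one), PySem.Int.mod len_ans (PySem.List.len one))
  let div_two : Int × Int := (PySem.Int.floordiv len_ans (PySem.List.len two), PySem.Int.mod len_ans (PySem.List.len two))
  let div_three : Int × Int := (PySem.Int.floordiv len_ans (PySem.List.len three), PySem.Int.mod len_ans (PySem.List.len three))
  -- `lst * q` for q ≥ 0 (here q = len_ans // k ≥ 0) is q concatenated copies (exact)
  let one_list := (List.replicate (div_one.1).toNat one).flatten ++ PySem.List.slice one none (some div_one.2)
  let two_list := (List.replicate (div_two.1).toNat two).flatten ++ PySem.List.slice two none (some div_two.2)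
  let three_list := (List.replicate (div_three.1).toNat three).flatten ++ PySem.List.slice three none (some div_three.2)
  let res : PySem.Dict Int Int := PySem.Dict.ofList [(1, 0), (2, 0), (3, 0)]
  -- res[k] += 1 with key k present is modify k (· + 1) (exact: keys 1,2,3 are always present)
  let res := (PySem.List.pyRange 0 len_ans 1).foldl (fun r i =>
    let r := if PySem.List.pyGetD answers i 0 = PySem.List.pyGetD one_list i 0 then r.modify 1 0 (· + 1) else r
    let r := if PySem.List.pyGetD answers i 0 = PySem.List.pyGetD two_list i 0 then r.modify 2 0 (· + 1) else r
    if PySem.List.pyGetD answers i 0 = PySem.List.pyGetD three_list i 0 then r.modify 3 0 (· + 1) else r) res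
  let resList := PySem.List.sorted res.items (fun x => x.2) true
  -- res[0] is exact: the sorted list always has 3 items
  (resList.filter (fun i => i.2 == (PySem.List.pyGetD resList 0 (0, 0)).2)).map (fun i => i.1)

-- ===== PORT B =====
def solution_alt (answers : List Int) : List Int :=
  -- hist = {}; for i, a in enumerate(answers): key = (i % 40, a); hist[key] = hist.get(key, 0) + 1
  let hist : PySem.Dict (Int × Int) Int :=
    (PySem.List.enumerate answers 0).foldl (fun h ia =>
      let key : Int × Int := (PySem.Int.mod ia.1 40, ia.2)
      h.insert key (h.getD key 0 + 1)) PySem.Dict.empty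
  let score : List Int → Int := fun p =>
    ((PySem.List.pyRange 0 40 1).map (fun j =>
      hist.getD (j, PySem.List.pyGetD p (PySem.Int.mod j (PySem.List.len p)) 0) 0)).sum
  let scores : List Int := [score [1, 2, 3, 4, 5],
                            score [2, 1, 2, 3, 2, 4, 2, 5],
                            score [3, 3, 1, 1, 2, 2, 4, 4, 5, 5]]
  -- max(scores) is exact: scores always has 3 items
  let m : Int := (PySem.List.max? scores (fun s => s)).getD 0
  ((PySem.List.enumerate scores 0).filter (fun is => is.2 == m)).map (fun is => is.1 + 1)

-- ===== PRECONDITION & SPEC =====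
def Spec_solution (answers : List Int) (out : List Int) : Prop := out = solution_alt answers
instance (answers : List Int) (out : List Int) : Decidable (Spec_solution answers out) := by unfold Spec_solution; infer_instance

-- ===== CLAIM (what is proved, stated in full; the proofs are below) =====
def Claim_equal_solution : Prop := ∀ (answers : List Int), Dom_solution answers → Spec_solution answers (solution answers)

-- ===== LEMMAS AND PROOFS =====

-- indicator sum over an index list (proof-only helper)
def pvInd (f : Int → Prop) [DecidablePred f] (L : List Int) : Int :=
  (L.map (fun i => if f i then (1:Int) else 0)).sum

-- the full-length repeated pattern A precomputes (proof-only helper)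
def pvFull (p : List Int) (n : Nat) : List Int :=
  (List.replicate (n / p.length) p).flatten ++ p.take (n % p.length)

-- the per-supporter score as a direct cyclic scan (proof-only middle form)
def pvScore (pattern : List Int) (answers : List Int) : Int :=
  let n : Int := PySem.List.len pattern
  ((PySem.List.enumerate answers 0).map
    (fun ia => if ia.2 = PySem.List.pyGetD pattern (PySem.Int.mod ia.1 n) 0 then (1 : Int) else 0)).sum

theorem pvFull_eq (p : List Int) (n : Nat) :
    (List.replicate (PySem.Int.floordiv (n : Int) ((p.length : Nat) : Int)).toNat p).flatten ++
      PySem.List.slice p none (some (PySem.Int.mod (n : Int) ((p.length : Nat) : Int))) = pvFull p n := by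
  have hq : PySem.Int.floordiv (n : Int) ((p.length : Nat) : Int) = ((n / p.length : Nat) : Int) :=
    PySem.Int.floordiv_natCast n p.length
  have hm : PySem.Int.mod (n : Int) ((p.length : Nat) : Int) = ((n % p.length : Nat) : Int) :=
    PySem.Int.mod_natCast n p.length
  rw [hq, hm, Int.toNat_natCast, PySem.List.slice_to_natCast, pvFull]

theorem pvLoop (f1 f2 f3 : Int → Prop) [DecidablePred f1] [DecidablePred f2] [DecidablePred f3]
    (L : List Int) (a b c : Int) :
    L.foldl (fun r i =>
      let r := if f1 i then r.modify 1 0 (· + 1) else r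
      let r := if f2 i then r.modify 2 0 (· + 1) else r
      if f3 i then r.modify 3 0 (· + 1) else r) (PySem.Dict.mk [(1,a),(2,b),(3,c)] : PySem.Dict Int Int)
    = (PySem.Dict.mk [(1, a + pvInd f1 L), (2, b + pvInd f2 L), (3, c + pvInd f3 L)] : PySem.Dict Int Int) := by
  have m1 : ∀ x y z : Int, (PySem.Dict.mk [(1,x),(2,y),(3,z)] : PySem.Dict Int Int).modify 1 0 (· + 1) = PySem.Dict.mk [(1,x+1),(2,y),(3,z)] := fun _ _ _ => rfl
  have m2 : ∀ x y z : Int, (PySem.Dict.mk [(1,x),(2,y),(3,z)] : PySem.Dict Int Int).modify 2 0 (· + 1) = PySem.Dict.mk [(1,x),(2,y+1),(3,z)] := fun _ _ _ => rfl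
  have m3 : ∀ x y z : Int, (PySem.Dict.mk [(1,x),(2,y),(3,z)] : PySem.Dict Int Int).modify 3 0 (· + 1) = PySem.Dict.mk [(1,x),(2,y),(3,z+1)] := fun _ _ _ => rfl
  induction L generalizing a b c with
  | nil => simp [pvInd]
  | cons x L ih =>
    simp only [List.foldl_cons]
    by_cases h1 : f1 x <;> by_cases h2 : f2 x <;> by_cases h3 : f3 x <;>
      simp [pvInd, h1, h2, h3, m1, m2, m3, ih, add_assoc]

theorem pvCyc (p : List Int) (q r : Nat) (hr : r ≤ p.length) :
    ∀ j : Nat, j < q * p.length + r →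
    ((List.replicate q p).flatten ++ p.take r).getD j 0 = p.getD (j % p.length) 0 := by
  induction q with
  | zero =>
    intro j hj
    simp only [Nat.zero_mul, Nat.zero_add] at hj
    rw [List.replicate_zero, List.flatten_nil, List.nil_append]
    rw [Nat.mod_eq_of_lt (by omega)]
    simp [List.getD_eq_getElem?_getD, hj]
  | succ q ih =>
    intro j hj
    rw [List.replicate_succ, List.flatten_cons, List.append_assoc]
    by_cases hlt : j < p.length
    · rw [Nat.mod_eq_of_lt hlt]
      simp [List.getD_eq_getElem?_getD, List.getElem?_append, hlt]
    · have hge : p.length ≤ j := by omega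
      have hmul : (q + 1) * p.length = q * p.length + p.length := by ring
      have hthis : (p ++ ((List.replicate q p).flatten ++ p.take r)).getD j 0
           = ((List.replicate q p).flatten ++ p.take r).getD (j - p.length) 0 := by
        simp [List.getD_eq_getElem?_getD, List.getElem?_append_right hge]
      rw [hthis, ih (j - p.length) (by omega), Nat.mod_eq_sub_mod hge]

theorem pvScore_eq (p : List Int) (hp : 0 < p.length) (ans : List Int) :
    pvScore p ans
    = pvInd (fun i => PySem.List.pyGetD ans i 0 = PySem.List.pyGetD (pvFull p ans.length) i 0)
        (PySem.List.pyRange 0 ((ans.length : Nat) : Int) 1) := by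
  simp only [pvScore, PySem.List.len_eq]
  unfold pvInd
  rw [PySem.List.enumerate_eq_map_pyRange (d := 0)]
  simp only [List.map_map, PySem.List.len_eq]
  apply congrArg
  apply List.map_congr_left
  intro j hj
  rw [PySem.List.mem_pyRange_one] at hj
  obtain ⟨hj0, hjn⟩ := hj
  have hk : j = (j.toNat : Int) := (Int.toNat_of_nonneg hj0).symm
  have hkn : j.toNat < ans.length := by omega
  rw [hk]
  simp only [Function.comp, PySem.Int.mod_natCast, PySem.List.pyGetD_natCast]
  have hcyc := pvCyc p (ans.length / p.length) (ans.length % p.length)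
      (le_of_lt (Nat.mod_lt _ hp)) j.toNat
      (by rw [Nat.mul_comm, Nat.div_add_mod]; exact hkn)
  rw [pvFull] at *
  simp [List.getD_eq_getElem?_getD] at hcyc ⊢
  rw [hcyc]

theorem pvSumOne (f : Int → Int) (x : Int × Int) :
    ∀ (js : List Int), js.Nodup → x.1 ∈ js →
    (js.map (fun j => if x = (j, f j) then (1:Int) else 0)).sum
      = if x.2 = f x.1 then (1:Int) else 0 := by
  intro js
  induction js with
  | nil => intro _ h; cases h
  | cons j js ih =>
    intro hnd hmem
    obtain ⟨hj, hnd'⟩ := List.nodup_cons.mp hnd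
    simp only [List.map_cons, List.sum_cons]
    rcases List.mem_cons.mp hmem with h1 | h1
    · have hz : (js.map (fun j' => if x = (j', f j') then (1:Int) else 0)).sum = 0 := by
        have : ∀ y ∈ js.map (fun j' => if x = (j', f j') then (1:Int) else 0), y = 0 := by
          intro y hy
          obtain ⟨j', hj', rfl⟩ := List.mem_map.mp hy
          have hne : ¬ x = (j', f j') := by
            intro he; apply hj; rw [← h1]; have h2 := congrArg Prod.fst he; simp at h2; rw [h2]; exact hj'
          simp [hne]
        simpa using List.sum_eq_zero this
      rw [hz]
      rcases x with ⟨r, v⟩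
      simp only at h1
      subst h1
      by_cases hv : v = f r <;> simp [hv, Prod.ext_iff]
    · have hx : ¬ x = (j, f j) := by
        intro he; apply hj; have h2 := congrArg Prod.fst he; simp at h2; rwa [← h2]
      rw [ih hnd' h1]
      simp [hx]

theorem pvSumCount (f : Int → Int) (js : List Int) (hnd : js.Nodup) :
    ∀ (keys : List (Int × Int)), (∀ x ∈ keys, x.1 ∈ js) →
    (js.map (fun j => ((keys.count (j, f j) : Nat) : Int))).sum
      = ((keys.countP (fun x => decide (x.2 = f x.1)) : Nat) : Int) := by
  intro keys
  induction keys with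
  | nil => intro _; simp
  | cons x keys ih =>
    intro hmem
    have hx : x.1 ∈ js := hmem x (List.mem_cons_self)
    have h' : ∀ y ∈ keys, y.1 ∈ js := fun y hy => hmem y (List.mem_cons_of_mem _ hy)
    have hcnt : ∀ j : Int, (((x :: keys).count (j, f j) : Nat) : Int)
        = ((keys.count (j, f j) : Nat) : Int) + (if x = (j, f j) then (1:Int) else 0) := by
      intro j
      rw [List.count_cons]
      by_cases h : x = (j, f j) <;> simp [h, beq_iff_eq]
    simp only [hcnt]
    rw [PySem.List.sum_map_add_int, ih h', pvSumOne f x js hnd hx, List.countP_cons]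
    by_cases h : x.2 = f x.1 <;> simp [h]

theorem pvHistFold (answers : List Int) :
    (PySem.List.enumerate answers 0).foldl (fun h ia =>
        h.insert (PySem.Int.mod ia.1 40, ia.2) (h.getD (PySem.Int.mod ia.1 40, ia.2) 0 + 1))
      (PySem.Dict.empty : PySem.Dict (Int × Int) Int)
    = PySem.Dict.counter ((PySem.List.enumerate answers 0).map (fun ia => (PySem.Int.mod ia.1 40, ia.2))) := by
  rw [← PySem.Dict.foldl_insert_getD_add_one_eq_counter, List.foldl_map]

theorem pvHist (p : List Int) (hp : 0 < p.length) (hd : ((p.length : Nat) : Int) ∣ 40) (answers : List Int) :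
    ((PySem.List.pyRange 0 40 1).map (fun j =>
        (PySem.Dict.counter ((PySem.List.enumerate answers 0).map (fun ia => (PySem.Int.mod ia.1 40, ia.2)))).getD
          (j, PySem.List.pyGetD p (PySem.Int.mod j ((p.length : Nat) : Int)) 0) 0)).sum
    = pvScore p answers := by
  have h40 : (0:Int) < 40 := by norm_num
  have hn : (0:Int) < ((p.length : Nat) : Int) := by exact_mod_cast hp
  simp only [PySem.Dict.getD_counter]
  rw [pvSumCount (fun j => PySem.List.pyGetD p (PySem.Int.mod j ((p.length : Nat) : Int)) 0)
        (PySem.List.pyRange 0 40 1) (PySem.List.nodup_pyRange_one 0 40) _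
        (by
          intro x hx
          obtain ⟨ia, _, rfl⟩ := List.mem_map.mp hx
          rw [PySem.List.mem_pyRange_one]
          exact ⟨PySem.Int.mod_nonneg _ h40, PySem.Int.mod_lt _ h40⟩)]
  rw [List.countP_map]
  simp only [Function.comp_def]
  have hmm : ∀ i : Int, PySem.Int.mod (PySem.Int.mod i 40) ((p.length : Nat) : Int) = PySem.Int.mod i ((p.length : Nat) : Int) := by
    intro i
    rw [PySem.Int.mod_eq_emod_of_pos hn, PySem.Int.mod_eq_emod_of_pos hn,
        PySem.Int.mod_eq_emod_of_pos h40]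
    exact Int.emod_emod_of_dvd i hd
  simp only [hmm, pvScore, PySem.List.len_eq]
  have hs := PySem.List.sum_map_ite_one_zero
      (fun x : Int × Int => decide (x.2 = PySem.List.pyGetD p (PySem.Int.mod x.1 ((p.length : Nat) : Int)) 0))
      (PySem.List.enumerate answers 0)
  simp only [decide_eq_true_eq] at hs
  exact hs.symm

theorem pvTail (xv yv zv : Int) :
    (let resList := PySem.List.sorted ([(1,xv),(2,yv),(3,zv)] : List (Int × Int)) (fun x => x.2) true
     (resList.filter (fun i => i.2 == (PySem.List.pyGetD resList 0 (0,0)).2)).map (fun i => i.1))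
    = (let m := (PySem.List.max? ([xv,yv,zv] : List Int) (fun s => s)).getD 0
       ((PySem.List.enumerate ([xv,yv,zv] : List Int) 0).filter (fun is => is.2 == m)).map (fun is => is.1 + 1)) := by
  by_cases h1 : xv < yv <;> by_cases h2 : yv < zv <;> by_cases h3 : xv < zv <;>
    simp [PySem.List.sorted, PySem.List.insertBy, PySem.List.max?, PySem.List.enumerate,
      PySem.List.pyGetD, PySem.List.pyGet?, PySem.List.pyIdx?, h1, h2, h3, List.filter] <;>
    (repeat' split) <;> simp_all <;> omega

theorem pvMain (answers : List Int) : solution answers = solution_alt answers := by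
  simp only [solution, solution_alt, PySem.List.len_eq]
  simp only [pvFull_eq]
  rw [show (PySem.Dict.ofList [(1,(0:Int)),(2,0),(3,0)] : PySem.Dict Int Int)
        = PySem.Dict.mk [(1,0),(2,0),(3,0)] from rfl]
  rw [pvLoop (fun i => PySem.List.pyGetD answers i 0 = PySem.List.pyGetD (pvFull [1,2,3,4,5] answers.length) i 0)
             (fun i => PySem.List.pyGetD answers i 0 = PySem.List.pyGetD (pvFull [2,1,2,3,2,4,2,5] answers.length) i 0)
             (fun i => PySem.List.pyGetD answers i 0 = PySem.List.pyGetD (pvFull [3,3,1,1,2,2,4,4,5,5] answers.length) i 0)]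
  rw [pvHistFold]
  rw [pvHist [1,2,3,4,5] (by norm_num) (by norm_num) answers,
      pvHist [2,1,2,3,2,4,2,5] (by norm_num) (by norm_num) answers,
      pvHist [3,3,1,1,2,2,4,4,5,5] (by norm_num) (by norm_num) answers]
  rw [pvScore_eq [1,2,3,4,5] (by norm_num) answers,
      pvScore_eq [2,1,2,3,2,4,2,5] (by norm_num) answers,
      pvScore_eq [3,3,1,1,2,2,4,4,5,5] (by norm_num) answers]
  simp only [zero_add]
  exact pvTail _ _ _

-- ===== VERDICT (by name: the statement is the Claim_ definition above) =====
theorem solution_spec : Claim_equal_solution := by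
  intro answers _
  unfold Spec_solution
  exact pvMain answers
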